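-- pv_equiv track=rewrite | github.com/Hacker-Code-J/DES | python/approx_graph.py | bit_statistics
-- ===== SOURCE A (Python) =====
-- def bit_statistics(numbers, bits=4):
--     bit_counts_1 = [0] * bits  # Count of '1' bits
--     bit_counts_0 = [0] * bits  # Count of '0' bits
--     for number in numbers:
--         for i in range(bits):
--             if number & (1 << i):
--                 bit_counts_1[i] += 1
--             else:
--                 bit_counts_0[i] += 1
--     return bit_counts_0, bit_counts_1
-- ===== SOURCE B (Python) =====
-- def bit_statistics(numbers, bits=4):
--     # Bit-major: for each bit position, count the numbers with that bit set.
--     ones = [sum(1 for x in numbers if x & (1 << i)) for i in range(bits)]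
--     zeros = [len(numbers) - c for c in ones]
--     return zeros, ones
-- ===== Notes on version B (the rewrite author's own statement) =====
-- stated objective: alternative
-- what changed: B inverts the traversal: instead of A's number-major nested loop mutating two count lists in place, B is bit-major - for each bit position it counts the set bits across numbers with a sum over a comprehension, and derives zero-counts as len(numbers) minus the one-counts.
import Mathlib
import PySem

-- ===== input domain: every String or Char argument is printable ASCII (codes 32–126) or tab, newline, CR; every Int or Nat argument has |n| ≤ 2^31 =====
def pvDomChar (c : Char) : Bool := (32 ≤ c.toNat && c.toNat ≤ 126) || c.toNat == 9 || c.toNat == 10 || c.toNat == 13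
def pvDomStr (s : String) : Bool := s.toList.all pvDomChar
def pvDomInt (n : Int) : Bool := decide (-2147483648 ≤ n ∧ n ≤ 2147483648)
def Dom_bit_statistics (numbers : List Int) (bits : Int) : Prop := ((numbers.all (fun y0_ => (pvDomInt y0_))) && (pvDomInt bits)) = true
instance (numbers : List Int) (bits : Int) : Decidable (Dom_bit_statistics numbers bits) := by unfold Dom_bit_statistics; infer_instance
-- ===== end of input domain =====

-- B inverts the traversal order: bit-major counting (one sum per bit position, zeros derived
-- as len - ones) instead of A's number-major nested loop mutating two count lists in place.

-- ===== PORT A =====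
-- literal transliteration of A: two count lists, outer loop over numbers, inner loop over
-- range(bits), if/else incrementing one list or the other; 'number & (1 << i)' is
-- PySem.Int.band (i from range(bits) is nonnegative, so '1 << i' is 1 <<< i.toNat);
-- truthiness of an int = ≠ 0
def bit_statistics (numbers : List Int) (bits : Int) : List Int × List Int :=
  let bit_counts_1 : List Int := List.replicate bits.toNat 0
  let bit_counts_0 : List Int := List.replicate bits.toNat 0
  numbers.foldl (fun (st : List Int × List Int) number =>
    (PySem.List.pyRange 0 bits 1).foldl (fun (st2 : List Int × List Int) i =>
      if PySem.Int.band number (1 <<< i.toNat) ≠ 0 then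
        (st2.1, st2.2.modify i.toNat (· + 1))
      else
        (st2.1.modify i.toNat (· + 1), st2.2)) st) (bit_counts_0, bit_counts_1)

-- ===== PORT B =====
-- literal transliteration of B: bit-major comprehensions;
-- 'sum(1 for x in numbers if x & (1 << i))' = sum of 1 over the filtered list
def bit_statistics_alt (numbers : List Int) (bits : Int) : List Int × List Int :=
  let ones : List Int := (PySem.List.pyRange 0 bits 1).map (fun i =>
    ((numbers.filter (fun x => decide (PySem.Int.band x (1 <<< i.toNat) ≠ 0))).map
      (fun _ => (1 : Int))).sum)
  let zeros : List Int := ones.map (fun c => (numbers.length : Int) - c)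
  (zeros, ones)

-- ===== PRECONDITION & SPEC =====
def Spec_bit_statistics (numbers : List Int) (bits : Int) (out : List Int × List Int) : Prop := out = bit_statistics_alt numbers bits
instance (numbers : List Int) (bits : Int) (out : List Int × List Int) : Decidable (Spec_bit_statistics numbers bits out) := by unfold Spec_bit_statistics; infer_instance

-- ===== CLAIM =====
def Claim_equal_bit_statistics : Prop := ∀ (numbers : List Int) (bits : Int), Dom_bit_statistics numbers bits → Spec_bit_statistics numbers bits (bit_statistics numbers bits)

-- ===== LEMMAS AND PROOFS =====

-- the bit test 'number & (1 << k)' as a Bool predicate on the Nat index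
def pvQ (x : Int) (k : Nat) : Bool := decide (PySem.Int.band x (1 <<< k) ≠ 0)

-- canonical single-list loop: for k in range m, bump index k when q number k
def pvUpd (q : Int → Nat → Bool) (number : Int) (m : Nat) (l : List Int) : List Int :=
  (List.range m).foldl (fun l k => if q number k then l.modify k (· + 1) else l) l

def pvOuter (q : Int → Nat → Bool) (m : Nat) (numbers : List Int) (l : List Int) : List Int :=
  numbers.foldl (fun l number => pvUpd q number m l) l

theorem pvUpd_get? (q : Int → Nat → Bool) (number : Int) (m : Nat) (l : List Int) (j : Nat) :
    (pvUpd q number m l)[j]? =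
      if j < m ∧ q number j then l[j]?.map (· + 1) else l[j]? := by
  induction m with
  | zero => simp [pvUpd]
  | succ m ih =>
    simp only [pvUpd] at ih ⊢
    rw [List.range_succ, List.foldl_append, List.foldl_cons, List.foldl_nil]
    by_cases hq : q number m
    · rw [if_pos hq, List.getElem?_modify, ih]
      by_cases hjm : j = m
      · subst hjm; simp [hq]
      · have hne : ¬ (m = j) := fun h => hjm h.symm
        by_cases hlt : j < m
        · have h1 : j < m + 1 := by omega
          simp [hne, hlt, h1]
        · have h1 : ¬ j < m + 1 := by omega
          simp [hne, hlt, h1]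
    · rw [if_neg hq, ih]
      by_cases hlt : j < m
      · have h1 : j < m + 1 := by omega
        simp [hlt, h1]
      · by_cases hjm : j = m
        · subst hjm; simp [hq]
        · have h1 : ¬ j < m + 1 := by omega
          simp [hlt, h1]

theorem pvOuter_get? (q : Int → Nat → Bool) (m : Nat) (numbers : List Int) (l : List Int) (j : Nat) :
    (pvOuter q m numbers l)[j]? =
      if j < m then l[j]?.map (· + (numbers.countP (fun x => q x j) : Int)) else l[j]? := by
  induction numbers generalizing l with
  | nil =>
    cases h : l[j]? <;> simp [pvOuter, h]
  | cons x rest ih =>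
    simp only [pvOuter, List.foldl_cons] at *
    rw [ih, pvUpd_get?]
    by_cases hlt : j < m
    · by_cases hq : q x j
      · simp only [hlt, hq, and_self, if_pos, List.countP_cons]
        cases h : l[j]? <;> simp <;> try ring
      · have hno : ¬ (j < m ∧ q x j) := by tauto
        simp only [hlt, if_pos, List.countP_cons]
        cases h : l[j]? <;> simp [hq]
    · have hno : ¬ (j < m ∧ q x j) := by tauto
      simp [hlt]

-- A's inner loop splits componentwise (the branch depends only on number and i)
theorem pvPairSplit (number : Int) (is : List Int) (z o : List Int) :
    is.foldl (fun (st2 : List Int × List Int) i =>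
        if PySem.Int.band number (1 <<< i.toNat) ≠ 0 then
          (st2.1, st2.2.modify i.toNat (· + 1))
        else
          (st2.1.modify i.toNat (· + 1), st2.2)) (z, o)
    = (is.foldl (fun l i => if PySem.Int.band number (1 <<< i.toNat) ≠ 0 then l
          else l.modify i.toNat (· + 1)) z,
       is.foldl (fun l i => if PySem.Int.band number (1 <<< i.toNat) ≠ 0 then
          l.modify i.toNat (· + 1) else l) o) := by
  induction is generalizing z o with
  | nil => rfl
  | cons i rest ih =>
    simp only [List.foldl_cons]
    by_cases h : PySem.Int.band number (1 <<< i.toNat) ≠ 0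
    · rw [if_pos h, if_pos h, if_pos h]; exact ih _ _
    · rw [if_neg h, if_neg h, if_neg h]; exact ih _ _

-- the inner ones-loop over the pyRange is pvUpd pvQ
theorem pvOfold_eq (number : Int) (bits : Int) (l : List Int) :
    (PySem.List.pyRange 0 bits 1).foldl (fun l i =>
        if PySem.Int.band number (1 <<< i.toNat) ≠ 0 then l.modify i.toNat (· + 1) else l) l
    = pvUpd pvQ number bits.toNat l := by
  rw [PySem.List.pyRange_one, List.foldl_map]
  simp [pvUpd, pvQ]

-- the inner zeros-loop over the pyRange is pvUpd (¬ pvQ)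
theorem pvZfold_eq (number : Int) (bits : Int) (l : List Int) :
    (PySem.List.pyRange 0 bits 1).foldl (fun l i =>
        if PySem.Int.band number (1 <<< i.toNat) ≠ 0 then l else l.modify i.toNat (· + 1)) l
    = pvUpd (fun x k => ! pvQ x k) number bits.toNat l := by
  rw [PySem.List.pyRange_one, List.foldl_map]
  simp [pvUpd, pvQ, ite_not]

-- A's whole fold splits componentwise
theorem pvA_fold (bits : Int) (numbers : List Int) (z o : List Int) :
    numbers.foldl (fun (st : List Int × List Int) number =>
      (PySem.List.pyRange 0 bits 1).foldl (fun (st2 : List Int × List Int) i =>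
        if PySem.Int.band number (1 <<< i.toNat) ≠ 0 then
          (st2.1, st2.2.modify i.toNat (· + 1))
        else
          (st2.1.modify i.toNat (· + 1), st2.2)) st) (z, o)
    = (pvOuter (fun x k => ! pvQ x k) bits.toNat numbers z,
       pvOuter pvQ bits.toNat numbers o) := by
  induction numbers generalizing z o with
  | nil => rfl
  | cons x rest ih =>
    simp only [List.foldl_cons, pvOuter, pvPairSplit, pvOfold_eq, pvZfold_eq]
    have := ih (pvUpd (fun x k => ! pvQ x k) x bits.toNat z) (pvUpd pvQ x bits.toNat o)
    simpa [pvOuter] using this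

theorem pvA_eq (numbers : List Int) (bits : Int) :
    bit_statistics numbers bits =
      (pvOuter (fun x k => ! pvQ x k) bits.toNat numbers (List.replicate bits.toNat 0),
       pvOuter pvQ bits.toNat numbers (List.replicate bits.toNat 0)) := by
  show List.foldl _ _ _ = _
  exact pvA_fold bits numbers _ _

-- B written through pvQ and countP
theorem pvB_eq (numbers : List Int) (bits : Int) :
    bit_statistics_alt numbers bits =
      ((List.range bits.toNat).map
         (fun j => (numbers.length : Int) - (numbers.countP (fun x => pvQ x j) : Int)),
       (List.range bits.toNat).map (fun j => (numbers.countP (fun x => pvQ x j) : Int))) := by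
  simp only [bit_statistics_alt, PySem.List.pyRange_one, List.map_map, Function.comp_def,
    zero_add, Int.sub_zero]
  refine Prod.ext ?_ ?_
  · apply List.map_congr_left
    intro j hj
    simp [pvQ, List.countP_eq_length_filter]
  · apply List.map_congr_left
    intro j hj
    simp [pvQ, List.countP_eq_length_filter]

-- ===== VERDICT =====
theorem bit_statistics_spec : Claim_equal_bit_statistics := by
  intro numbers bits _
  show bit_statistics numbers bits = bit_statistics_alt numbers bits
  rw [pvA_eq, pvB_eq]
  refine Prod.ext ?_ ?_
  · apply List.ext_getElem?
    intro j
    rw [pvOuter_get?, List.getElem?_map]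
    by_cases hj : j < bits.toNat
    · rw [if_pos hj, List.getElem?_replicate, if_pos hj, List.getElem?_range hj]
      have hcnt : numbers.length =
          numbers.countP (fun x => pvQ x j) + numbers.countP (fun x => ! pvQ x j) := by
        have := List.length_eq_countP_add_countP (fun x => pvQ x j) (l := numbers)
        simpa using this
      simp only [Option.map_some]
      congr 1
      omega
    · rw [if_neg hj, List.getElem?_replicate, if_neg hj,
        List.getElem?_eq_none (by simpa using hj)]
      rfl
  · apply List.ext_getElem?
    intro j
    rw [pvOuter_get?, List.getElem?_map]
    by_cases hj : j < bits.toNat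
    · rw [if_pos hj, List.getElem?_replicate, if_pos hj, List.getElem?_range hj]
      simp
    · rw [if_neg hj, List.getElem?_replicate, if_neg hj,
        List.getElem?_eq_none (by simpa using hj)]
      rfl
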